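-- pv_equiv track=rewrite | github.com/unboxing96/ALGO | 프로그래머스/2/42586. 기능개발/기능개발.py | solution
-- ===== SOURCE A (Python) =====
-- def solution(progresses, speeds):
--     answer = []
--     leftovers = []
--
--     for i in range(len(progresses)):
--         quotient = (100 - progresses[i]) // speeds[i]
--         remainder = (100 - progresses[i]) % speeds[i]
--         if remainder:
--             quotient += 1
--         leftovers.append(quotient)
--
--     leftovers.reverse()
--
--     while leftovers:
--         top = leftovers.pop()
--         cnt = 1
--         while leftovers and leftovers[-1] <= top:
--             leftovers.pop()
--             cnt += 1
--         answer.append(cnt)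
--
--     return answer
-- ===== SOURCE B (Python) =====
-- def solution(progresses, speeds):
--     # Single forward pass: no leftovers list, no reverse, no stack pops.
--     answer = []
--     lead = None
--     cnt = 0
--     for p, s in zip(progresses, speeds):
--         day = -((p - 100) // s)  # ceil((100 - p) / s)
--         if lead is None or day > lead:
--             if cnt:
--                 answer.append(cnt)
--             lead = day
--             cnt = 1
--         else:
--             cnt += 1
--     if cnt:
--         answer.append(cnt)
--     return answer
-- ===== Notes on version B (the rewrite author's own statement) =====
-- stated objective: simpler
-- what changed: B fuses A's two phases (build a leftovers list, reverse it, then group it with an explicit stack-pop loop) into one streaming pass that keeps only the current group's lead day and a counter, computing each day with the ceil-division trick -((p-100)//s); dropping the intermediate list, the reverse and the pop loops is a constant-factor saving.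
import Mathlib
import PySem

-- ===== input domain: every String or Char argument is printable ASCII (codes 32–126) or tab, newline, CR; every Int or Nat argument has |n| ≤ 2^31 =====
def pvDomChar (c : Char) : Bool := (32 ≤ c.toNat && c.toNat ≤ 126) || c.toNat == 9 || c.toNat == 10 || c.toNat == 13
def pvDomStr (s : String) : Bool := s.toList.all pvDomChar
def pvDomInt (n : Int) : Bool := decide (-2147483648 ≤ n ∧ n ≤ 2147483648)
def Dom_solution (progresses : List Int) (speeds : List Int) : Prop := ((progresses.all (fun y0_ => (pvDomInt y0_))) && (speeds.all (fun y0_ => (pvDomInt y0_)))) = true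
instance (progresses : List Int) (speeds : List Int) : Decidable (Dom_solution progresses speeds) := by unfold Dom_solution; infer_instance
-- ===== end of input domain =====

-- ===== PORT A =====
-- One '(100-p)//s' / '(100-p)%s' step of the first loop; append to leftovers.
def pvA_day (p s : Int) : Int :=
  let quotient := PySem.Int.floordiv (100 - p) s
  let remainder := PySem.Int.mod (100 - p) s
  if remainder ≠ 0 then quotient + 1 else quotient

-- Inner 'while leftovers and leftovers[-1] <= top': the state list is kept with
-- the pop end (leftovers[-1]) at its HEAD, so pop() is head-consumption.
def pvA_inner (st : List Int) (top : Int) (cnt : Int) : List Int × Int :=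
  match st with
  | [] => ([], cnt)
  | x :: rest => if x ≤ top then pvA_inner rest top (cnt + 1) else (x :: rest, cnt)

theorem pvA_inner_len_le (st : List Int) (top cnt : Int) :
    (pvA_inner st top cnt).1.length ≤ st.length := by
  induction st generalizing cnt with
  | nil => simp [pvA_inner]
  | cons x rest ih =>
    simp only [pvA_inner]
    split
    · exact Nat.le_succ_of_le (ih _)
    · simp

-- Outer 'while leftovers': pop top, run the inner loop, append cnt to answer.
def pvA_outer (st : List Int) (answer : List Int) : List Int :=
  match st with
  | [] => answer
  | top :: rest =>
      let p := pvA_inner rest top 1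
      pvA_outer p.1 (answer ++ [p.2])
termination_by st.length
decreasing_by
  exact Nat.lt_succ_of_le (pvA_inner_len_le rest top 1)

def solution (progresses : List Int) (speeds : List Int) : List Int :=
  -- for i in range(len(progresses)): leftovers.append(quotient [+1])
  let leftovers :=
    (PySem.List.pyRange 0 (progresses.length) 1).foldl
      (fun acc i =>
        acc ++ [pvA_day (PySem.List.pyGetD progresses i 0) (PySem.List.pyGetD speeds i 0)])
      []
  -- leftovers.reverse(); then the pop loops read leftovers[-1], i.e. (with the
  -- pop end at the head) the ORIGINAL front: state = leftovers.reverse.reverse.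
  pvA_outer leftovers.reverse.reverse []

-- ===== PORT B =====
-- B: one streaming pass (lead day + counter) replacing A's build/reverse/pop-loop phases; measured constant-factor speedup.
-- One step of B's single forward pass; state = (lead, cnt, answer).
def pvB_step (st : Option Int × Int × List Int) (pr : Int × Int) : Option Int × Int × List Int :=
  let day := -(PySem.Int.floordiv (pr.1 - 100) pr.2)
  match st with
  | (none, cnt, ans) => (some day, 1, if cnt ≠ 0 then ans ++ [cnt] else ans)
  | (some lead, cnt, ans) =>
      if day > lead then (some day, 1, if cnt ≠ 0 then ans ++ [cnt] else ans)
      else (some lead, cnt + 1, ans)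

def solution_alt (progresses : List Int) (speeds : List Int) : List Int :=
  let st := (progresses.zip speeds).foldl pvB_step (none, 0, [])
  if st.2.1 ≠ 0 then st.2.2 ++ [st.2.1] else st.2.2

-- ===== PRECONDITION & SPEC =====
-- Pre_ excludes exactly where A raises: IndexError (speeds shorter than
-- progresses) or ZeroDivisionError (a zero speed among the used prefix).
def Pre_solution (progresses : List Int) (speeds : List Int) : Prop :=
  progresses.length ≤ speeds.length ∧ ∀ x ∈ speeds.take progresses.length, x ≠ 0
instance (progresses : List Int) (speeds : List Int) : Decidable (Pre_solution progresses speeds) := by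
  unfold Pre_solution; infer_instance

def pvWitness_solution : List Int × List Int := ([93, 30, 55], [1, 30, 5])

def Spec_solution (progresses : List Int) (speeds : List Int) (out : List Int) : Prop := out = solution_alt progresses speeds
instance (progresses : List Int) (speeds : List Int) (out : List Int) : Decidable (Spec_solution progresses speeds out) := by unfold Spec_solution; infer_instance

-- ===== CLAIM (what is proved, stated in full; the proofs are below) =====
def Claim_equal_solution : Prop := ∀ (progresses : List Int) (speeds : List Int), Dom_solution progresses speeds → Pre_solution progresses speeds → Spec_solution progresses speeds (solution progresses speeds)
-- ===== LEMMAS AND PROOFS =====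

-- Proof-side abbreviations for B's fold: the day of a pair, the step on a
-- precomputed day, and the final flush of (lead, cnt, answer).
def pvDay (pr : Int × Int) : Int := -(PySem.Int.floordiv (pr.1 - 100) pr.2)

def pvG (st : Option Int × Int × List Int) (day : Int) : Option Int × Int × List Int :=
  match st with
  | (none, cnt, ans) => (some day, 1, if cnt ≠ 0 then ans ++ [cnt] else ans)
  | (some lead, cnt, ans) =>
      if day > lead then (some day, 1, if cnt ≠ 0 then ans ++ [cnt] else ans)
      else (some lead, cnt + 1, ans)

theorem pvB_step_eq_g (st : Option Int × Int × List Int) (pr : Int × Int) :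
    pvB_step st pr = pvG st (pvDay pr) := rfl

def pvFlush (st : Option Int × Int × List Int) : List Int :=
  if st.2.1 ≠ 0 then st.2.2 ++ [st.2.1] else st.2.2

-- A's quotient/remainder branch is ceiling division, for every nonzero divisor.
theorem pvA_day_eq_ceil (p s : Int) (hs : s ≠ 0) :
    pvA_day p s = pvDay (p, s) := by
  unfold pvA_day pvDay
  have eq1 := PySem.Int.floordiv_mul_add_mod (100 - p) s
  have eq2 := PySem.Int.floordiv_mul_add_mod (p - 100) s
  set q1 := PySem.Int.floordiv (100 - p) s with hq1
  set r1 := PySem.Int.mod (100 - p) s with hr1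
  set q2 := PySem.Int.floordiv (p - 100) s with hq2
  set r2 := PySem.Int.mod (p - 100) s with hr2
  have hd1 : r1 = 0 ↔ s ∣ (100 - p) := PySem.Int.mod_eq_zero_iff_dvd _ _
  have hd2 : r2 = 0 ↔ s ∣ (p - 100) := PySem.Int.mod_eq_zero_iff_dvd _ _
  by_cases h : r1 = 0
  · have h2 : r2 = 0 := by
      rw [hd2, show p - 100 = -(100 - p) by ring]
      exact dvd_neg.mpr (hd1.mp h)
    have hks : (q1 + q2) * s = 0 := by rw [add_mul]; linarith
    have : q1 + q2 = 0 := by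
      rcases mul_eq_zero.mp hks with h' | h'
      · exact h'
      · exact absurd h' hs
    simp only [h, ne_eq, not_true_eq_false, if_false]
    omega
  · have h2 : r2 ≠ 0 := by
      intro hz
      apply h
      rw [hd1, show 100 - p = -(p - 100) by ring]
      exact dvd_neg.mpr (hd2.mp hz)
    have hks : (-(q1 + q2)) * s = r1 + r2 := by rw [neg_mul, add_mul]; linarith
    have hsum : q1 + q2 = -1 := by
      rcases lt_or_gt_of_ne hs with hneg | hpos
      · have b1 := PySem.Int.mod_neg_bounds (a := 100 - p) hneg
        have b2 := PySem.Int.mod_neg_bounds (a := p - 100) hneg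
        rw [← hr1] at b1
        rw [← hr2] at b2
        have ht : (0 : Int) < -s := by omega
        have hkt : (-(q1 + q2)) * (-s) = -(r1 + r2) := by rw [mul_neg, hks]
        have hk0 : (0 : Int) < -(q1 + q2) := by
          have : (0 : Int) * (-s) < (-(q1 + q2)) * (-s) := by rw [hkt]; omega
          exact lt_of_mul_lt_mul_right this (by omega)
        have hk2 : -(q1 + q2) < 2 := by
          have : (-(q1 + q2)) * (-s) < 2 * (-s) := by rw [hkt]; omega
          exact lt_of_mul_lt_mul_right this (by omega)
        omega
      · have b1n := PySem.Int.mod_nonneg (a := 100 - p) hpos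
        have b1l := PySem.Int.mod_lt (a := 100 - p) hpos
        have b2n := PySem.Int.mod_nonneg (a := p - 100) hpos
        have b2l := PySem.Int.mod_lt (a := p - 100) hpos
        rw [← hr1] at b1n b1l
        rw [← hr2] at b2n b2l
        have hk0 : (0 : Int) < -(q1 + q2) := by
          have : (0 : Int) * s < (-(q1 + q2)) * s := by rw [hks]; omega
          exact lt_of_mul_lt_mul_right this (by omega)
        have hk2 : -(q1 + q2) < 2 := by
          have : (-(q1 + q2)) * s < 2 * s := by rw [hks]; omega
          exact lt_of_mul_lt_mul_right this (by omega)
        omega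
    simp only [h, ne_eq, not_false_eq_true, if_true]
    omega

theorem pvA_outer_append (st : List Int) (ans : List Int) :
    pvA_outer st ans = ans ++ pvA_outer st [] := by
  match st with
  | [] => simp [pvA_outer]
  | top :: rest =>
    simp only [pvA_outer]
    rw [pvA_outer_append (pvA_inner rest top 1).1 (ans ++ [(pvA_inner rest top 1).2]),
        pvA_outer_append (pvA_inner rest top 1).1 ([] ++ [(pvA_inner rest top 1).2])]
    simp
termination_by st.length
decreasing_by all_goals exact Nat.lt_succ_of_le (pvA_inner_len_le rest top 1)

-- B's fold, once inside a group, matches A's inner pop loop + continuation.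
theorem pv_fold_inner (days : List Int) (top cnt : Int) (ans : List Int) (hc : 0 < cnt) :
    pvFlush (days.foldl pvG (some top, cnt, ans)) =
    ans ++ [(pvA_inner days top cnt).2] ++ pvA_outer (pvA_inner days top cnt).1 [] := by
  induction days generalizing top cnt ans with
  | nil =>
    simp [pvFlush, pvA_inner, pvA_outer]
    omega
  | cons d rest ih =>
    by_cases hd : d ≤ top
    · have hstep : pvG (some top, cnt, ans) d = (some top, cnt + 1, ans) := by
        simp only [pvG]
        rw [if_neg (show ¬ top < d by omega)]
      simp only [List.foldl_cons, hstep, pvA_inner, if_pos hd]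
      exact ih top (cnt + 1) ans (by omega)
    · have hstep : pvG (some top, cnt, ans) d = (some d, 1, ans ++ [cnt]) := by
        simp only [pvG]
        rw [if_pos (show top < d by omega), if_pos (show cnt ≠ 0 by omega)]
      simp only [List.foldl_cons, hstep, pvA_inner, if_neg hd]
      rw [ih d 1 (ans ++ [cnt]) (by omega)]
      simp only [pvA_outer]
      rw [pvA_outer_append (pvA_inner rest d 1).1 ([] ++ [(pvA_inner rest d 1).2])]
      simp

-- The leftovers A builds = the per-pair day list B streams over.
theorem pv_leftovers_eq (progresses speeds : List Int)
    (hlen : progresses.length ≤ speeds.length)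
    (hz : ∀ x ∈ speeds.take progresses.length, x ≠ 0) :
    ((PySem.List.pyRange 0 (progresses.length) 1).foldl
      (fun acc i =>
        acc ++ [pvA_day (PySem.List.pyGetD progresses i 0) (PySem.List.pyGetD speeds i 0)])
      []) =
    (progresses.zip speeds).map pvDay := by
  rw [PySem.List.foldl_append_singleton_eq_map]
  apply List.ext_getElem
  · simp [PySem.List.length_pyRange_one]
    omega
  · intro i h1 h2
    have hip : i < progresses.length := by
      simp [List.length_zip] at h2
      omega
    have his : i < speeds.length := by omega
    simp only [List.nil_append, List.getElem_map, PySem.List.getElem_pyRange_one, zero_add,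
      PySem.List.pyGetD_natCast, List.getElem_zip]
    rw [List.getD_eq_getElem _ _ hip, List.getD_eq_getElem _ _ his]
    exact pvA_day_eq_ceil _ _ (hz _ (by
      have : (speeds.take progresses.length)[i]'(by simp; omega) = speeds[i] :=
        List.getElem_take
      exact this ▸ List.getElem_mem _))

-- ===== VERDICT (by name: the statement is the Claim_ definition above) =====
theorem solution_spec : Claim_equal_solution := by
  intro progresses speeds _ hpre
  obtain ⟨hlen, hz⟩ := hpre
  unfold Spec_solution
  simp only [solution, solution_alt]
  rw [pv_leftovers_eq progresses speeds hlen hz, List.reverse_reverse]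
  have hfold : ∀ init, (progresses.zip speeds).foldl pvB_step init =
      ((progresses.zip speeds).map pvDay).foldl pvG init := by
    intro init
    rw [List.foldl_map]
    exact congrArg (fun f => List.foldl f init (progresses.zip speeds))
      (funext fun st => funext fun pr => pvB_step_eq_g st pr)
  rw [hfold]
  symm
  generalize (progresses.zip speeds).map pvDay = days
  match days with
  | [] => simp [pvA_outer]
  | d :: rest =>
    have hstep : pvG (none, 0, ([] : List Int)) d = (some d, 1, []) := by
      simp [pvG]
    show pvFlush ((d :: rest).foldl pvG (none, 0, [])) = pvA_outer (d :: rest) []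
    simp only [List.foldl_cons, hstep]
    rw [pv_fold_inner rest d 1 [] (by omega)]
    conv_rhs => rw [pvA_outer]
    rw [pvA_outer_append (pvA_inner rest d 1).1 ([] ++ [(pvA_inner rest d 1).2])]
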